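-- pv_equiv track=rewrite | github.com/NextCenturyCorporation/itm-ingest | sim_analysis.py | compute_correct_tag_breakdown
-- ===== SOURCE A (Python) =====
-- def normalize_tag_color(tag):
--     tag = str(tag or "").strip().lower()
--     if tag == "yellow_orange":
--         return "yellow"
--     if tag == "green_blue":
--         return "green"
--     return tag
--
-- def compute_correct_tag_breakdown(expected_tag_color, tags_applied):
--     """
--     Legacy-style correct tag breakdown adapted to CSV-derived triage truth.
--
--     Returns flattened fields:
--       - correct_tags_total
--       - correct_tags_correct
--       - correct_tags_over
--       - correct_tags_under
--       - correct_tags_critical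
--     """
--     correct = 0
--     total = 0
--     over_triage = 0
--     under_triage = 0
--     critical_triage = 0
--
--     for patient, applied_raw in tags_applied.items():
--         expected = expected_tag_color.get(patient)
--         if expected is None:
--             continue
--
--         applied = normalize_tag_color(applied_raw)
--         expected = normalize_tag_color(expected)
--
--         if applied == expected:
--             correct += 1
--         else:
--             truth = expected
--             guess = applied
--
--             if truth == "black":
--                 over_triage += 1
--             elif guess == "black":
--                 critical_triage += 1
--             elif truth == "gray":
--                 over_triage += 1
--             elif guess == "gray":
--                 critical_triage += 1
--             elif truth == "red":
--                 under_triage += 1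
--             elif guess == "red":
--                 over_triage += 1
--             elif truth == "yellow":
--                 under_triage += 1
--             elif guess == "yellow":
--                 over_triage += 1
--
--         total += 1
--
--     return {
--         "correct_tags_total": total,
--         "correct_tags_correct": correct,
--         "correct_tags_over": over_triage,
--         "correct_tags_under": under_triage,
--         "correct_tags_critical": critical_triage,
--     }
-- ===== SOURCE B (Python) =====
-- def normalize_tag_color(tag):
--     tag = str(tag or "").strip().lower()
--     if tag == "yellow_orange":
--         return "yellow"
--     if tag == "green_blue":
--         return "green"
--     return tag
--
-- _RULES = [("black", "over", "critical"),
--           ("gray", "over", "critical"),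
--           ("red", "under", "over"),
--           ("yellow", "under", "over")]
--
-- def _classify(truth, guess):
--     for color, truth_cat, guess_cat in _RULES:
--         if truth == color:
--             return truth_cat
--         if guess == color:
--             return guess_cat
--     return None
--
-- def compute_correct_tag_breakdown(expected_tag_color, tags_applied):
--     pairs = [(normalize_tag_color(expected_tag_color[p]), normalize_tag_color(a))
--              for p, a in tags_applied.items()
--              if expected_tag_color.get(p) is not None]
--     mism = [_classify(e, a) for e, a in pairs if e != a]
--     return {
--         "correct_tags_total": len(pairs),
--         "correct_tags_correct": sum(1 for e, a in pairs if e == a),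
--         "correct_tags_over": mism.count("over"),
--         "correct_tags_under": mism.count("under"),
--         "correct_tags_critical": mism.count("critical"),
--     }
-- ===== Notes on version B (the rewrite author's own statement) =====
-- stated objective: simpler
-- what changed: Replaces the single stateful five-counter loop by a normalized-pairs list comprehension (total/correct via len and a count) plus a data-driven rule table with one classify helper instead of the eight-branch if/elif cascade.
import Mathlib
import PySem

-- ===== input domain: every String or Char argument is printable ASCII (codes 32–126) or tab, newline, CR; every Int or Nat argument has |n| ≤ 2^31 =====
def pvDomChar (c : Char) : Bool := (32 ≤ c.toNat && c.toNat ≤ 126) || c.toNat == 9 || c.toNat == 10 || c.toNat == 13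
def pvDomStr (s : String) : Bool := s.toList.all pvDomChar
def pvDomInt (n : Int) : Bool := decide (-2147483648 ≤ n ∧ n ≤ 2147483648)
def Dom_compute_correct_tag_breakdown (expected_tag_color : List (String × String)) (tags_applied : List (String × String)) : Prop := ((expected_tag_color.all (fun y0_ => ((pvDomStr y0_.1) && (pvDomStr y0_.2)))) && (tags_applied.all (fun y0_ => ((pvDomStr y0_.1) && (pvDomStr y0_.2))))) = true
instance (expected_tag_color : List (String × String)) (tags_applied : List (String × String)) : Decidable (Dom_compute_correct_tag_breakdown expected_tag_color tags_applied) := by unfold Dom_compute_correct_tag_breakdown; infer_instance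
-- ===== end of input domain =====

-- B replaces A's single stateful five-counter loop by a normalized-pairs list plus a
-- data-driven rule table with one classify helper; objective: simpler (same O(n) cost).


-- ===== PORT A =====
-- normalize_tag_color: 'tag or ""' is the identity on a (possibly empty) string, str() too
def normalize_tag_color (tag : String) : String :=
  let t := PySem.Str.lower (PySem.Str.strip tag)
  if t = "yellow_orange" then "yellow"
  else if t = "green_blue" then "green"
  else t

-- dict.get on an association list: first match
def pvLookup : List (String × String) → String → Option String
  | [], _ => none
  | (k, v) :: rest, x => if k = x then some v else pvLookup rest x

-- loop body of A: state (correct, total, over, under, critical)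
def pvStepA (expected_tag_color : List (String × String))
    (st : Int × Int × Int × Int × Int) (pa : String × String) : Int × Int × Int × Int × Int :=
  match pvLookup expected_tag_color pa.1 with
  | none => st
  | some exp =>
    let applied := normalize_tag_color pa.2
    let expected := normalize_tag_color exp
    let (c, t, o, u, k) := st
    if applied = expected then (c + 1, t + 1, o, u, k)
    else if expected = "black" then (c, t + 1, o + 1, u, k)
    else if applied = "black" then (c, t + 1, o, u, k + 1)
    else if expected = "gray" then (c, t + 1, o + 1, u, k)
    else if applied = "gray" then (c, t + 1, o, u, k + 1)
    else if expected = "red" then (c, t + 1, o, u + 1, k)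
    else if applied = "red" then (c, t + 1, o + 1, u, k)
    else if expected = "yellow" then (c, t + 1, o, u + 1, k)
    else if applied = "yellow" then (c, t + 1, o + 1, u, k)
    else (c, t + 1, o, u, k)

def compute_correct_tag_breakdown (expected_tag_color : List (String × String)) (tags_applied : List (String × String)) : List (String × Int) :=
  let st := tags_applied.foldl (pvStepA expected_tag_color) (0, 0, 0, 0, 0)
  [("correct_tags_total", st.2.1),
   ("correct_tags_correct", st.1),
   ("correct_tags_over", st.2.2.1),
   ("correct_tags_under", st.2.2.2.1),
   ("correct_tags_critical", st.2.2.2.2)]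

-- ===== PORT B =====
def pvRules : List (String × String × String) :=
  [("black", "over", "critical"), ("gray", "over", "critical"),
   ("red", "under", "over"), ("yellow", "under", "over")]

def pvClassifyAux (truth guess : String) : List (String × String × String) → Option String
  | [] => none
  | (color, truth_cat, guess_cat) :: rest =>
    if truth = color then some truth_cat
    else if guess = color then some guess_cat
    else pvClassifyAux truth guess rest

def pvClassify (truth guess : String) : Option String :=
  pvClassifyAux truth guess pvRules

def pvPairs (expected_tag_color : List (String × String)) (tags_applied : List (String × String)) : List (String × String) :=
  tags_applied.filterMap (fun pa =>
    match pvLookup expected_tag_color pa.1 with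
    | none => none
    | some exp => some (normalize_tag_color exp, normalize_tag_color pa.2))

def compute_correct_tag_breakdown_alt (expected_tag_color : List (String × String)) (tags_applied : List (String × String)) : List (String × Int) :=
  let pairs := pvPairs expected_tag_color tags_applied
  let mism := (pairs.filter (fun p => p.1 ≠ p.2)).map (fun p => pvClassify p.1 p.2)
  [("correct_tags_total", (pairs.length : Int)),
   ("correct_tags_correct", ((pairs.filter (fun p => p.1 = p.2)).length : Int)),
   ("correct_tags_over", (mism.count (some "over") : Int)),
   ("correct_tags_under", (mism.count (some "under") : Int)),
   ("correct_tags_critical", (mism.count (some "critical") : Int))]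

-- ===== PRECONDITION & SPEC =====
def Spec_compute_correct_tag_breakdown (expected_tag_color : List (String × String)) (tags_applied : List (String × String)) (out : List (String × Int)) : Prop := out = compute_correct_tag_breakdown_alt expected_tag_color tags_applied
instance (expected_tag_color : List (String × String)) (tags_applied : List (String × String)) (out : List (String × Int)) : Decidable (Spec_compute_correct_tag_breakdown expected_tag_color tags_applied out) := by unfold Spec_compute_correct_tag_breakdown; infer_instance

-- ===== CLAIM (what is proved, stated in full; the proofs are below) =====
def Claim_equal_compute_correct_tag_breakdown : Prop := ∀ (expected_tag_color : List (String × String)) (tags_applied : List (String × String)), Dom_compute_correct_tag_breakdown expected_tag_color tags_applied → Spec_compute_correct_tag_breakdown expected_tag_color tags_applied (compute_correct_tag_breakdown expected_tag_color tags_applied)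

-- ===== LEMMAS AND PROOFS =====

-- B-side counters, as a function of the normalized-pairs list
def pvCntP (pairs : List (String × String)) : Int × Int × Int × Int × Int :=
  let mism := (pairs.filter (fun p => p.1 ≠ p.2)).map (fun p => pvClassify p.1 p.2)
  (((pairs.filter (fun p => p.1 = p.2)).length : Int), (pairs.length : Int),
   (mism.count (some "over") : Int), (mism.count (some "under") : Int),
   (mism.count (some "critical") : Int))

theorem pvCntP_cons_eq (x : String) (l : List (String × String)) :
    pvCntP ((x, x) :: l) =
      ((pvCntP l).1 + 1, (pvCntP l).2.1 + 1, (pvCntP l).2.2.1,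
       (pvCntP l).2.2.2.1, (pvCntP l).2.2.2.2) := by
  simp [pvCntP]

theorem pvCntP_cons_ne (x a : String) (l : List (String × String)) (h : ¬ x = a) :
    pvCntP ((x, a) :: l) =
      ((pvCntP l).1,
       (pvCntP l).2.1 + 1,
       (pvCntP l).2.2.1 + (if pvClassify x a = some "over" then 1 else 0),
       (pvCntP l).2.2.2.1 + (if pvClassify x a = some "under" then 1 else 0),
       (pvCntP l).2.2.2.2 + (if pvClassify x a = some "critical" then 1 else 0)) := by
  simp [pvCntP, h, List.count_cons]

theorem pvCascade_eq (x a : String) (c t o u k : Int) :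
    (if x = "black" then (c, t + 1, o + 1, u, k)
     else if a = "black" then (c, t + 1, o, u, k + 1)
     else if x = "gray" then (c, t + 1, o + 1, u, k)
     else if a = "gray" then (c, t + 1, o, u, k + 1)
     else if x = "red" then (c, t + 1, o, u + 1, k)
     else if a = "red" then (c, t + 1, o + 1, u, k)
     else if x = "yellow" then (c, t + 1, o, u + 1, k)
     else if a = "yellow" then (c, t + 1, o + 1, u, k)
     else (c, t + 1, o, u, k)) =
      (c, t + 1,
       o + (if pvClassify x a = some "over" then 1 else 0),
       u + (if pvClassify x a = some "under" then 1 else 0),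
       k + (if pvClassify x a = some "critical" then 1 else 0)) := by
  simp only [pvClassify, pvClassifyAux, pvRules]
  split_ifs <;> simp_all

theorem pv_fold_eq (e : List (String × String)) :
    ∀ (ta : List (String × String)) (c t o u k : Int),
      ta.foldl (pvStepA e) (c, t, o, u, k) =
        (c + (pvCntP (pvPairs e ta)).1, t + (pvCntP (pvPairs e ta)).2.1,
         o + (pvCntP (pvPairs e ta)).2.2.1, u + (pvCntP (pvPairs e ta)).2.2.2.1,
         k + (pvCntP (pvPairs e ta)).2.2.2.2) := by
  intro ta
  induction ta with
  | nil => intro c t o u k; simp [pvCntP, pvPairs]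
  | cons pa rest ih =>
    intro c t o u k
    simp only [List.foldl_cons]
    rcases hlk : pvLookup e pa.1 with _ | exp
    · rw [show pvStepA e (c, t, o, u, k) pa = (c, t, o, u, k) by simp [pvStepA, hlk]]
      rw [ih]
      have : pvPairs e (pa :: rest) = pvPairs e rest := by simp [pvPairs, hlk]
      rw [this]
    · have hpairs : pvPairs e (pa :: rest) =
          (normalize_tag_color exp, normalize_tag_color pa.2) :: pvPairs e rest := by
        simp [pvPairs, hlk]
      have hstep0 : pvStepA e (c, t, o, u, k) pa =
          (let a := normalize_tag_color pa.2
           let x := normalize_tag_color exp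
           if a = x then (c + 1, t + 1, o, u, k)
           else if x = "black" then (c, t + 1, o + 1, u, k)
           else if a = "black" then (c, t + 1, o, u, k + 1)
           else if x = "gray" then (c, t + 1, o + 1, u, k)
           else if a = "gray" then (c, t + 1, o, u, k + 1)
           else if x = "red" then (c, t + 1, o, u + 1, k)
           else if a = "red" then (c, t + 1, o + 1, u, k)
           else if x = "yellow" then (c, t + 1, o, u + 1, k)
           else if a = "yellow" then (c, t + 1, o + 1, u, k)
           else (c, t + 1, o, u, k)) := by
        simp only [pvStepA, hlk]
      rw [hstep0, hpairs]
      generalize normalize_tag_color exp = x at *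
      generalize normalize_tag_color pa.2 = a at *
      simp only []
      by_cases heq : a = x
      · subst heq
        rw [if_pos rfl, ih, pvCntP_cons_eq]
        refine Prod.ext ?_ (Prod.ext ?_ (Prod.ext ?_ (Prod.ext ?_ ?_))) <;> simp <;> ring
      · have hne : ¬ x = a := fun h => heq h.symm
        rw [if_neg heq, pvCascade_eq x a c t o u k, ih, pvCntP_cons_ne x a _ hne]
        refine Prod.ext ?_ (Prod.ext ?_ (Prod.ext ?_ (Prod.ext ?_ ?_))) <;> simp <;> ring

theorem compute_correct_tag_breakdown_eq_alt (e ta : List (String × String)) :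
    compute_correct_tag_breakdown e ta = compute_correct_tag_breakdown_alt e ta := by
  simp only [compute_correct_tag_breakdown, compute_correct_tag_breakdown_alt]
  rw [pv_fold_eq]
  simp [pvCntP]

-- ===== VERDICT (by name: the statement is the Claim_ definition above) =====
theorem compute_correct_tag_breakdown_spec : Claim_equal_compute_correct_tag_breakdown := by
  intro e ta _
  unfold Spec_compute_correct_tag_breakdown
  exact compute_correct_tag_breakdown_eq_alt e ta
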